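-- pv_equiv track=rewrite | github.com/ZLZhangLi/my_write | 0909_oneplus_02.py | f
-- ===== SOURCE A (Python) =====
-- def f(m,res):
--     for i in range(len(m) - 1):
--         if m[i] < m[i + 1]:
--             up = 1
--             for j in range(i+1,len(m)-1):
--                 if m[j] > m[j + 1]:
--                     down = 1
--                     for k in range(j+1,len(m)-1):
--                         if m[k] < m[k+1]:
--                             res = False
--
--         elif m[i] > m[i + 1]:
--             down = 1
--             for j in range(i+1,len(m)-1):
--                 if m[j] < m[j + 1]:
--                     up = 1
--                     for k in range(j+1,len(m)-1):
--                         if m[k] > m[k+1]: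
--                             res = False
--     return res
-- ===== SOURCE B (Python) =====
-- def f(m, res):
--     seen_up = seen_down = False
--     up_down = down_up = False
--     found = False
--     for a, b in zip(m, m[1:]):
--         if a < b:
--             if up_down:
--                 found = True
--             if seen_down:
--                 down_up = True
--             seen_up = True
--         elif a > b:
--             if down_up:
--                 found = True
--             if seen_up:
--                 up_down = True
--             seen_down = True
--     return False if found else res
-- ===== Notes on version B (the rewrite author's own statement) =====
-- stated objective: faster
-- what changed: Replaced A's three nested index scans over the slope signs by a single linear pass that tracks which sign patterns (up; up-down; down; down-up; full zigzag) have occurred so far.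
import Mathlib
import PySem

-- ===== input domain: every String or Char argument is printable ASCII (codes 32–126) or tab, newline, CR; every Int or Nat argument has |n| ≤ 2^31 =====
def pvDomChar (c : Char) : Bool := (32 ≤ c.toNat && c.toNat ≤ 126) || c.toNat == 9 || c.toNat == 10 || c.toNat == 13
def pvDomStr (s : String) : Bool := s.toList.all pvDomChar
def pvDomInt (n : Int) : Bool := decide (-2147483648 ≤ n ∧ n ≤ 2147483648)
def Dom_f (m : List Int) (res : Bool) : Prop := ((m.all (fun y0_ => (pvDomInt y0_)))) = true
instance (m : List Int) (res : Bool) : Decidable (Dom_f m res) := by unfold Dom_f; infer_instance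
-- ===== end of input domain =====

-- B replaces A's three nested index scans by one linear pass that tracks which
-- slope-sign patterns (up; up,down; down; down,up; and a full zigzag) have appeared so far.

-- ===== PORT A =====
-- Literal port of A's triple nested loops; A's dead assignments 'up = 1' / 'down = 1'
-- (never read) are omitted as they have no effect.
def f (m : List Int) (res : Bool) : Bool :=
  (PySem.List.pyRange 0 ((m.length : Int) - 1) 1).foldl (fun res i =>
    if PySem.List.pyGetD m i 0 < PySem.List.pyGetD m (i + 1) 0 then
      (PySem.List.pyRange (i + 1) ((m.length : Int) - 1) 1).foldl (fun res j =>
        if PySem.List.pyGetD m j 0 > PySem.List.pyGetD m (j + 1) 0 then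
          (PySem.List.pyRange (j + 1) ((m.length : Int) - 1) 1).foldl (fun res k =>
            if PySem.List.pyGetD m k 0 < PySem.List.pyGetD m (k + 1) 0 then false else res) res
        else res) res
    else if PySem.List.pyGetD m i 0 > PySem.List.pyGetD m (i + 1) 0 then
      (PySem.List.pyRange (i + 1) ((m.length : Int) - 1) 1).foldl (fun res j =>
        if PySem.List.pyGetD m j 0 < PySem.List.pyGetD m (j + 1) 0 then
          (PySem.List.pyRange (j + 1) ((m.length : Int) - 1) 1).foldl (fun res k =>
            if PySem.List.pyGetD m k 0 > PySem.List.pyGetD m (k + 1) 0 then false else res) res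
        else res) res
    else res) res

-- ===== PORT B =====
-- state = (seen_up, seen_down, up_down, down_up, found)
def fAltStep (st : Bool × Bool × Bool × Bool × Bool) (p : Int × Int) :
    Bool × Bool × Bool × Bool × Bool :=
  match st, p with
  | (su, sd, ud, du, fd), (a, b) =>
    if a < b then
      (true, sd, ud, if sd then true else du, if ud then true else fd)
    else if a > b then
      (su, true, if su then true else ud, du, if du then true else fd)
    else (su, sd, ud, du, fd)

def f_alt (m : List Int) (res : Bool) : Bool :=
  let st := (m.zip (PySem.List.slice m (some 1) none)).foldl fAltStep
              (false, false, false, false, false)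
  if st.2.2.2.2 then false else res

-- ===== PRECONDITION & SPEC =====
def Spec_f (m : List Int) (res : Bool) (out : Bool) : Prop := out = f_alt m res
instance (m : List Int) (res : Bool) (out : Bool) : Decidable (Spec_f m res out) := by unfold Spec_f; infer_instance

-- ===== CLAIM (what is proved, stated in full; the proofs are below) =====
def Claim_equal_f : Prop := ∀ (m : List Int) (res : Bool), Dom_f m res → Spec_f m res (f m res)

-- ===== LEMMAS AND PROOFS =====

-- pattern detectors on the list of adjacent pairs
def anyU (l : List (Int × Int)) : Bool := l.any (fun p => p.1 < p.2)
def anyD (l : List (Int × Int)) : Bool := l.any (fun p => p.2 < p.1)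
def sUD : List (Int × Int) → Bool
  | [] => false
  | p :: t => (decide (p.1 < p.2) && anyD t) || sUD t
def sDU : List (Int × Int) → Bool
  | [] => false
  | p :: t => (decide (p.2 < p.1) && anyU t) || sDU t
def sUDU : List (Int × Int) → Bool
  | [] => false
  | p :: t => (decide (p.1 < p.2) && sDU t) || sUDU t
def sDUD : List (Int × Int) → Bool
  | [] => false
  | p :: t => (decide (p.2 < p.1) && sUD t) || sDUD t

-- ----- B side -----
lemma fold_step (l : List (Int × Int)) :
    ∀ su sd ud du fd,
      l.foldl fAltStep (su, sd, ud, du, fd) =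
        (su || anyU l,
         sd || anyD l,
         ud || (su && anyD l) || sUD l,
         du || (sd && anyU l) || sDU l,
         fd || (ud && anyU l) || (du && anyD l) || (su && sDU l) || (sd && sUD l)
            || sUDU l || sDUD l) := by
  induction l with
  | nil => intro su sd ud du fd; simp [anyU, anyD, sUD, sDU, sUDU, sDUD]
  | cons p t ih =>
    intro su sd ud du fd
    rcases p with ⟨a, b⟩
    rcases lt_trichotomy a b with h | h | h
    · have hgt : ¬ b < a := by omega
      have e1 : anyU ((a, b) :: t) = true := by simp [anyU, h]
      have e2 : anyD ((a, b) :: t) = anyD t := by simp [anyD, hgt]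
      have e3 : sUD ((a, b) :: t) = (anyD t || sUD t) := by simp [sUD, h]
      have e4 : sDU ((a, b) :: t) = sDU t := by simp [sDU, hgt]
      have e5 : sUDU ((a, b) :: t) = (sDU t || sUDU t) := by simp [sUDU, h]
      have e6 : sDUD ((a, b) :: t) = sDUD t := by simp [sDUD, hgt]
      rw [List.foldl_cons,
        show fAltStep (su, sd, ud, du, fd) (a, b)
            = (true, sd, ud, if sd then true else du, if ud then true else fd) from by
          simp [fAltStep, h],
        ih, e1, e2, e3, e4, e5, e6]
      clear ih e1 e2 e3 e4 e5 e6 h hgt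
      generalize anyU t = x1
      generalize anyD t = x2
      generalize sUD t = x3
      generalize sDU t = x4
      generalize sUDU t = x5
      generalize sDUD t = x6
      revert su sd ud du fd x1 x2 x3 x4 x5 x6
      decide
    · subst h
      have h1 : ¬ a < a := lt_irrefl a
      have e1 : anyU ((a, a) :: t) = anyU t := by simp [anyU]
      have e2 : anyD ((a, a) :: t) = anyD t := by simp [anyD]
      have e3 : sUD ((a, a) :: t) = sUD t := by simp [sUD]
      have e4 : sDU ((a, a) :: t) = sDU t := by simp [sDU]
      have e5 : sUDU ((a, a) :: t) = sUDU t := by simp [sUDU]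
      have e6 : sDUD ((a, a) :: t) = sDUD t := by simp [sDUD]
      rw [List.foldl_cons,
        show fAltStep (su, sd, ud, du, fd) (a, a) = (su, sd, ud, du, fd) from by
          simp [fAltStep],
        ih, e1, e2, e3, e4, e5, e6]
    · have hlt : ¬ a < b := by omega
      have e1 : anyU ((a, b) :: t) = anyU t := by simp [anyU, hlt]
      have e2 : anyD ((a, b) :: t) = true := by simp [anyD, h]
      have e3 : sUD ((a, b) :: t) = sUD t := by simp [sUD, hlt]
      have e4 : sDU ((a, b) :: t) = (anyU t || sDU t) := by simp [sDU, h]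
      have e5 : sUDU ((a, b) :: t) = sUDU t := by simp [sUDU, hlt]
      have e6 : sDUD ((a, b) :: t) = (sUD t || sDUD t) := by simp [sDUD, h]
      rw [List.foldl_cons,
        show fAltStep (su, sd, ud, du, fd) (a, b)
            = (su, true, if su then true else ud, du, if du then true else fd) from by
          simp [fAltStep, hlt, h],
        ih, e1, e2, e3, e4, e5, e6]
      clear ih e1 e2 e3 e4 e5 e6 h hlt
      generalize anyU t = x1
      generalize anyD t = x2
      generalize sUD t = x3
      generalize sDU t = x4
      generalize sUDU t = x5
      generalize sDUD t = x6
      revert su sd ud du fd x1 x2 x3 x4 x5 x6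
      decide

lemma f_alt_eq (m : List Int) (res : Bool) :
    f_alt m res = (res && !(sUDU (m.zip m.tail) || sDUD (m.zip m.tail))) := by
  simp only [f_alt, PySem.List.slice_from_one, fold_step, Bool.false_or, Bool.false_and]
  cases res <;> cases sUDU (m.zip m.tail) <;> cases sDUD (m.zip m.tail) <;> rfl

-- ----- A side -----
-- a foldl whose step is 'r && g x' computes 'r && all g'
lemma foldl_and {α : Type} (F : Bool → α → Bool) (g : α → Bool)
    (h : ∀ r x, F r x = (r && g x)) :
    ∀ (l : List α) (r : Bool), l.foldl F r = (r && l.all g) := by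
  intro l
  induction l with
  | nil => intro r; simp
  | cons x t ih => intro r; simp [h, ih, Bool.and_assoc]

-- index predicates of A over m
def upI (m : List Int) (k : Int) : Bool :=
  decide (PySem.List.pyGetD m k 0 < PySem.List.pyGetD m (k + 1) 0)
def downI (m : List Int) (k : Int) : Bool :=
  decide (PySem.List.pyGetD m k 0 > PySem.List.pyGetD m (k + 1) 0)

lemma upI_eq (m : List Int) (a : Nat) (ha : a < (m.zip m.tail).length) :
    upI m (a : Int) = decide ((m.zip m.tail)[a].1 < (m.zip m.tail)[a].2) := by
  have h1 : a < m.length := by simp at ha; omega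
  have h2 : a + 1 < m.length := by simp at ha; omega
  have c1 : PySem.List.pyGetD m ((a : Int)) 0 = m[a] := by
    rw [PySem.List.pyGetD_natCast, List.getD_eq_getElem m 0 h1]
  have c2 : PySem.List.pyGetD m ((a : Int) + 1) 0 = m[a + 1] := by
    rw [show ((a : Int) + 1) = ((a + 1 : Nat) : Int) by push_cast; ring,
      PySem.List.pyGetD_natCast, List.getD_eq_getElem m 0 h2]
  simp [upI, c1, c2, List.getElem_zip, List.getElem_tail]

lemma downI_eq (m : List Int) (a : Nat) (ha : a < (m.zip m.tail).length) :
    downI m (a : Int) = decide ((m.zip m.tail)[a].2 < (m.zip m.tail)[a].1) := by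
  have h1 : a < m.length := by simp at ha; omega
  have h2 : a + 1 < m.length := by simp at ha; omega
  have c1 : PySem.List.pyGetD m ((a : Int)) 0 = m[a] := by
    rw [PySem.List.pyGetD_natCast, List.getD_eq_getElem m 0 h1]
  have c2 : PySem.List.pyGetD m ((a : Int) + 1) 0 = m[a + 1] := by
    rw [show ((a : Int) + 1) = ((a + 1 : Nat) : Int) by push_cast; ring,
      PySem.List.pyGetD_natCast, List.getD_eq_getElem m 0 h2]
  simp [downI, gt_iff_lt, c1, c2, List.getElem_zip, List.getElem_tail]

lemma range_empty (m : List Int) (a : Nat) (h : (m.zip m.tail).length ≤ a) :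
    PySem.List.pyRange (a : Int) ((m.length : Int) - 1) 1 = [] := by
  have : ((m.length : Int) - 1 - a).toNat = 0 := by simp at h; omega
  simp [PySem.List.pyRange_one, this]

lemma range_cons (m : List Int) (a : Nat) (h : a < (m.zip m.tail).length) :
    PySem.List.pyRange (a : Int) ((m.length : Int) - 1) 1 =
      (a : Int) :: PySem.List.pyRange ((a : Int) + 1) ((m.length : Int) - 1) 1 := by
  refine PySem.List.pyRange_one_cons ?_
  simp at h; omega

lemma drop_cons (m : List Int) (a : Nat) (h : a < (m.zip m.tail).length) :
    (m.zip m.tail).drop a = (m.zip m.tail)[a] :: (m.zip m.tail).drop (a + 1) :=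
  (List.drop_eq_getElem_cons h)

-- level 1: innermost scans
lemma lvl1U (m : List Int) :
    ∀ (d a : Nat), (m.zip m.tail).length ≤ a + d →
      (PySem.List.pyRange (a : Int) ((m.length : Int) - 1) 1).all (fun k => !upI m k)
        = !anyU ((m.zip m.tail).drop a) := by
  intro d
  induction d with
  | zero =>
    intro a h
    rw [range_empty m a (by omega), List.drop_of_length_le (by omega)]
    simp [anyU]
  | succ d ih =>
    intro a h
    by_cases hlt : a < (m.zip m.tail).length
    · rw [range_cons m a hlt, drop_cons m a hlt]
      have := ih (a + 1) (by omega)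
      push_cast at this ⊢
      rw [List.all_cons, this, upI_eq m a hlt]
      simp [anyU]
    · rw [range_empty m a (by omega), List.drop_of_length_le (by omega)]
      simp [anyU]

lemma lvl1D (m : List Int) :
    ∀ (d a : Nat), (m.zip m.tail).length ≤ a + d →
      (PySem.List.pyRange (a : Int) ((m.length : Int) - 1) 1).all (fun k => !downI m k)
        = !anyD ((m.zip m.tail).drop a) := by
  intro d
  induction d with
  | zero =>
    intro a h
    rw [range_empty m a (by omega), List.drop_of_length_le (by omega)]
    simp [anyD]
  | succ d ih =>
    intro a h
    by_cases hlt : a < (m.zip m.tail).length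
    · rw [range_cons m a hlt, drop_cons m a hlt]
      have := ih (a + 1) (by omega)
      push_cast at this ⊢
      rw [List.all_cons, this, downI_eq m a hlt]
      simp [anyD]
    · rw [range_empty m a (by omega), List.drop_of_length_le (by omega)]
      simp [anyD]

-- level 2: middle scans
lemma lvl2DU (m : List Int) :
    ∀ (d a : Nat), (m.zip m.tail).length ≤ a + d →
      (PySem.List.pyRange (a : Int) ((m.length : Int) - 1) 1).all (fun j =>
        if downI m j
        then (PySem.List.pyRange (j + 1) ((m.length : Int) - 1) 1).all (fun k => !upI m k)
        else true)
        = !sDU ((m.zip m.tail).drop a) := by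
  intro d
  induction d with
  | zero =>
    intro a h
    rw [range_empty m a (by omega), List.drop_of_length_le (by omega)]
    simp [sDU]
  | succ d ih =>
    intro a h
    by_cases hlt : a < (m.zip m.tail).length
    · rw [range_cons m a hlt, drop_cons m a hlt]
      have h1 := lvl1U m (d + 1) (a + 1) (by omega)
      have h2 := ih (a + 1) (by omega)
      push_cast at h1 h2 ⊢
      rw [List.all_cons, h2, downI_eq m a hlt]
      rw [show sDU ((m.zip m.tail)[a] :: (m.zip m.tail).drop (a + 1)) =
            ((decide ((m.zip m.tail)[a].2 < (m.zip m.tail)[a].1)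
              && anyU ((m.zip m.tail).drop (a + 1)))
            || sDU ((m.zip m.tail).drop (a + 1))) from rfl]
      by_cases hd : (m.zip m.tail)[a].2 < (m.zip m.tail)[a].1
      · simp only [hd, decide_true, if_true, Bool.true_and, h1]
        cases anyU ((m.zip m.tail).drop (a + 1)) <;>
          cases sDU ((m.zip m.tail).drop (a + 1)) <;> rfl
      · simp [h1]
    · rw [range_empty m a (by omega), List.drop_of_length_le (by omega)]
      simp [sDU]

lemma lvl2UD (m : List Int) :
    ∀ (d a : Nat), (m.zip m.tail).length ≤ a + d →
      (PySem.List.pyRange (a : Int) ((m.length : Int) - 1) 1).all (fun j =>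
        if upI m j
        then (PySem.List.pyRange (j + 1) ((m.length : Int) - 1) 1).all (fun k => !downI m k)
        else true)
        = !sUD ((m.zip m.tail).drop a) := by
  intro d
  induction d with
  | zero =>
    intro a h
    rw [range_empty m a (by omega), List.drop_of_length_le (by omega)]
    simp [sUD]
  | succ d ih =>
    intro a h
    by_cases hlt : a < (m.zip m.tail).length
    · rw [range_cons m a hlt, drop_cons m a hlt]
      have h1 := lvl1D m (d + 1) (a + 1) (by omega)
      have h2 := ih (a + 1) (by omega)
      push_cast at h1 h2 ⊢
      rw [List.all_cons, h2, upI_eq m a hlt]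
      rw [show sUD ((m.zip m.tail)[a] :: (m.zip m.tail).drop (a + 1)) =
            ((decide ((m.zip m.tail)[a].1 < (m.zip m.tail)[a].2)
              && anyD ((m.zip m.tail).drop (a + 1)))
            || sUD ((m.zip m.tail).drop (a + 1))) from rfl]
      by_cases hu : (m.zip m.tail)[a].1 < (m.zip m.tail)[a].2
      · simp only [hu, decide_true, if_true, Bool.true_and, h1]
        cases anyD ((m.zip m.tail).drop (a + 1)) <;>
          cases sUD ((m.zip m.tail).drop (a + 1)) <;> rfl
      · simp [h1]
    · rw [range_empty m a (by omega), List.drop_of_length_le (by omega)]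
      simp [sUD]

-- level 3: the outer scan
lemma lvl3 (m : List Int) :
    ∀ (d a : Nat), (m.zip m.tail).length ≤ a + d →
      (PySem.List.pyRange (a : Int) ((m.length : Int) - 1) 1).all (fun i =>
        if upI m i
        then (PySem.List.pyRange (i + 1) ((m.length : Int) - 1) 1).all (fun j =>
              if downI m j
              then (PySem.List.pyRange (j + 1) ((m.length : Int) - 1) 1).all (fun k => !upI m k)
              else true)
        else if downI m i
        then (PySem.List.pyRange (i + 1) ((m.length : Int) - 1) 1).all (fun j =>
              if upI m j
              then (PySem.List.pyRange (j + 1) ((m.length : Int) - 1) 1).all (fun k => !downI m k)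
              else true)
        else true)
        = !(sUDU ((m.zip m.tail).drop a) || sDUD ((m.zip m.tail).drop a)) := by
  intro d
  induction d with
  | zero =>
    intro a h
    rw [range_empty m a (by omega), List.drop_of_length_le (by omega)]
    simp [sUDU, sDUD]
  | succ d ih =>
    intro a h
    by_cases hlt : a < (m.zip m.tail).length
    · rw [range_cons m a hlt, drop_cons m a hlt]
      have h1 := lvl2DU m (d + 1) (a + 1) (by omega)
      have h2 := lvl2UD m (d + 1) (a + 1) (by omega)
      have h3 := ih (a + 1) (by omega)
      push_cast at h1 h2 h3 ⊢
      rw [List.all_cons, h3, upI_eq m a hlt, downI_eq m a hlt]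
      rw [show sUDU ((m.zip m.tail)[a] :: (m.zip m.tail).drop (a + 1)) =
            ((decide ((m.zip m.tail)[a].1 < (m.zip m.tail)[a].2)
              && sDU ((m.zip m.tail).drop (a + 1)))
            || sUDU ((m.zip m.tail).drop (a + 1))) from rfl]
      rw [show sDUD ((m.zip m.tail)[a] :: (m.zip m.tail).drop (a + 1)) =
            ((decide ((m.zip m.tail)[a].2 < (m.zip m.tail)[a].1)
              && sUD ((m.zip m.tail).drop (a + 1)))
            || sDUD ((m.zip m.tail).drop (a + 1))) from rfl]
      by_cases hu : (m.zip m.tail)[a].1 < (m.zip m.tail)[a].2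
      · have hd : ¬ (m.zip m.tail)[a].2 < (m.zip m.tail)[a].1 := by omega
        simp only [hu, hd, decide_true, decide_false, if_true, Bool.true_and,
          Bool.false_and, Bool.false_or, h1]
        cases sDU ((m.zip m.tail).drop (a + 1)) <;>
          cases sUDU ((m.zip m.tail).drop (a + 1)) <;>
          cases sDUD ((m.zip m.tail).drop (a + 1)) <;> rfl
      · by_cases hd : (m.zip m.tail)[a].2 < (m.zip m.tail)[a].1
        · simp only [hu, hd, decide_true, decide_false, if_true,
            Bool.true_and, Bool.false_and, Bool.false_or, h2]
          cases sUD ((m.zip m.tail).drop (a + 1)) <;>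
            cases sUDU ((m.zip m.tail).drop (a + 1)) <;>
            cases sDUD ((m.zip m.tail).drop (a + 1)) <;> rfl
        · simp only [List.getElem_zip, List.getElem_tail] at hu hd
          simp [hu, hd]
    · rw [range_empty m a (by omega), List.drop_of_length_le (by omega)]
      simp [sUDU, sDUD]

lemma f_eq (m : List Int) (res : Bool) :
    f m res = (res && !(sUDU (m.zip m.tail) || sDUD (m.zip m.tail))) := by
  have hin : ∀ j r, (PySem.List.pyRange (j + 1) ((m.length : Int) - 1) 1).foldl
      (fun res k => if PySem.List.pyGetD m k 0 < PySem.List.pyGetD m (k + 1) 0 then false else res) r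
      = (r && (PySem.List.pyRange (j + 1) ((m.length : Int) - 1) 1).all (fun k => !upI m k)) := by
    intro j r
    refine foldl_and _ (fun k => !upI m k) ?_ _ r
    intro r x
    by_cases h : PySem.List.pyGetD m x 0 < PySem.List.pyGetD m (x + 1) 0 <;> simp [upI, h]
  have hinD : ∀ j r, (PySem.List.pyRange (j + 1) ((m.length : Int) - 1) 1).foldl
      (fun res k => if PySem.List.pyGetD m k 0 > PySem.List.pyGetD m (k + 1) 0 then false else res) r
      = (r && (PySem.List.pyRange (j + 1) ((m.length : Int) - 1) 1).all (fun k => !downI m k)) := by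
    intro j r
    refine foldl_and _ (fun k => !downI m k) ?_ _ r
    intro r x
    by_cases h : PySem.List.pyGetD m x 0 > PySem.List.pyGetD m (x + 1) 0 <;> simp [downI, h]
  have hmidDU : ∀ i r, (PySem.List.pyRange (i + 1) ((m.length : Int) - 1) 1).foldl
      (fun res j =>
        if PySem.List.pyGetD m j 0 > PySem.List.pyGetD m (j + 1) 0 then
          (PySem.List.pyRange (j + 1) ((m.length : Int) - 1) 1).foldl
            (fun res k => if PySem.List.pyGetD m k 0 < PySem.List.pyGetD m (k + 1) 0 then false else res) res
        else res) r
      = (r && (PySem.List.pyRange (i + 1) ((m.length : Int) - 1) 1).all (fun j =>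
          if downI m j
          then (PySem.List.pyRange (j + 1) ((m.length : Int) - 1) 1).all (fun k => !upI m k)
          else true)) := by
    intro i r
    refine foldl_and _ _ ?_ _ r
    intro r x
    by_cases h : PySem.List.pyGetD m x 0 > PySem.List.pyGetD m (x + 1) 0
    · rw [if_pos h, hin x r]
      congr 1
      simp [downI, h]
    · rw [if_neg h]
      simp [downI, h]
  have hmidUD : ∀ i r, (PySem.List.pyRange (i + 1) ((m.length : Int) - 1) 1).foldl
      (fun res j =>
        if PySem.List.pyGetD m j 0 < PySem.List.pyGetD m (j + 1) 0 then
          (PySem.List.pyRange (j + 1) ((m.length : Int) - 1) 1).foldl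
            (fun res k => if PySem.List.pyGetD m k 0 > PySem.List.pyGetD m (k + 1) 0 then false else res) res
        else res) r
      = (r && (PySem.List.pyRange (i + 1) ((m.length : Int) - 1) 1).all (fun j =>
          if upI m j
          then (PySem.List.pyRange (j + 1) ((m.length : Int) - 1) 1).all (fun k => !downI m k)
          else true)) := by
    intro i r
    refine foldl_and _ _ ?_ _ r
    intro r x
    by_cases h : PySem.List.pyGetD m x 0 < PySem.List.pyGetD m (x + 1) 0
    · rw [if_pos h, hinD x r]
      congr 1
      simp [upI, h]
    · rw [if_neg h]
      simp [upI, h]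
  have hout : f m res
      = (res && (PySem.List.pyRange ((0 : Nat) : Int) ((m.length : Int) - 1) 1).all (fun i =>
          if upI m i
          then (PySem.List.pyRange (i + 1) ((m.length : Int) - 1) 1).all (fun j =>
                if downI m j
                then (PySem.List.pyRange (j + 1) ((m.length : Int) - 1) 1).all (fun k => !upI m k)
                else true)
          else if downI m i
          then (PySem.List.pyRange (i + 1) ((m.length : Int) - 1) 1).all (fun j =>
                if upI m j
                then (PySem.List.pyRange (j + 1) ((m.length : Int) - 1) 1).all (fun k => !downI m k)
                else true)
          else true)) := by
    unfold f
    rw [show ((0 : Nat) : Int) = (0 : Int) from rfl]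
    refine foldl_and _ _ ?_ _ res
    intro r x
    by_cases h1 : PySem.List.pyGetD m x 0 < PySem.List.pyGetD m (x + 1) 0
    · rw [if_pos h1, hmidDU x r]
      congr 1
      simp [upI, h1]
    · by_cases h2 : PySem.List.pyGetD m x 0 > PySem.List.pyGetD m (x + 1) 0
      · rw [if_neg h1, if_pos h2, hmidUD x r]
        congr 1
        simp [upI, downI, h1, h2]
      · rw [if_neg h1, if_neg h2]
        simp [upI, downI, h1, h2]
  rw [hout, lvl3 m ((m.zip m.tail).length) 0 (by omega)]
  simp

-- ===== VERDICT (by name: the statement is the Claim_ definition above) =====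
theorem f_spec : Claim_equal_f := by
  intro m res _
  unfold Spec_f
  rw [f_eq, f_alt_eq]
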